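-- pv_equiv track=rewrite | github.com/KNU-HAEDAL/2024-Javascript-Algorithm | seung365/programmers/12.py | solution
-- ===== SOURCE A (Python) =====
-- def solution(prices):
--     answer = [0] * len(prices)
--     stack = []
--     stack.append((prices[0],0))
--     for index, price in enumerate(prices[1:-1]):
--         while stack and stack[-1][0] > price:
--             temp=stack.pop()
--             answer[temp[1]] = (index+1) - temp[1]
--
--         stack.append((price,index+1))
--
--     for i in stack:
--         answer[i[1]] = len(prices) - i[1] -1
--
--     return answer
-- ===== SOURCE B (Python) =====
-- def solution(prices):
--     n = len(prices)
--     answer = []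
--     for i in range(n):
--         count = 0
--         for j in range(i + 1, n):
--             count += 1
--             if prices[j] < prices[i]:
--                 break
--         answer.append(count)
--     return answer
-- ===== Notes on version B (the rewrite author's own statement) =====
-- stated objective: simpler
-- what changed: Replaced the monotonic-stack single pass (stack of pending indices plus a final flush) by the naive direct scan: for each position, walk forward counting elements until one is smaller, stopping there.
import Mathlib
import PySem

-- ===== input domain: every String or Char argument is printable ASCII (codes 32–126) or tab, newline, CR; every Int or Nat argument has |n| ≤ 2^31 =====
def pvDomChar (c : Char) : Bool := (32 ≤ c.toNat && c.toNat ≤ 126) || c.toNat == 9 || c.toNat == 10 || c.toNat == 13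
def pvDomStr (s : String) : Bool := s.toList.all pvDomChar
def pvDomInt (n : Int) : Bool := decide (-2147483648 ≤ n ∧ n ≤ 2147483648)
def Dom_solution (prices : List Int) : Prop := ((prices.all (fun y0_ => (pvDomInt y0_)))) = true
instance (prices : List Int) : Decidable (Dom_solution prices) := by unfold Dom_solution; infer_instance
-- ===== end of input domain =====

-- B replaces A's monotonic-stack single pass by the naive per-index forward scan (simpler, not faster).

-- ===== PORT A =====
-- the inner `while stack and stack[-1][0] > price` loop (head of the list = Python's stack top)
def pvPopLoop (answer : List Int) (stack : List (Int × Int)) (index : Int) (price : Int) :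
    List Int × List (Int × Int) :=
  match stack with
  | [] => (answer, [])
  | (p, j) :: rest =>
      if p > price then
        pvPopLoop (PySem.List.pySetD answer j ((index + 1) - j)) rest index price
      else (answer, (p, j) :: rest)

-- one iteration of the `for index, price in enumerate(prices[1:-1])` body
def pvStep (st : List Int × List (Int × Int)) (ip : Int × Int) : List Int × List (Int × Int) :=
  let (answer, stack) := pvPopLoop st.1 st.2 ip.1 ip.2
  (answer, (ip.2, ip.1 + 1) :: stack)

def solution (prices : List Int) : List Int :=
  match PySem.List.pyGet? prices 0 with
  | none => []            -- Python raises IndexError here; excluded by Pre_solution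
  | some p0 =>
    let answer0 : List Int := List.replicate prices.length 0
    let st := (PySem.List.enumerate (PySem.List.slice prices (some 1) (some (-1))) 0).foldl
        pvStep (answer0, [(p0, 0)])
    -- `for i in stack` runs bottom-to-top: with head-as-top that is foldr
    st.2.foldr (fun i ans => PySem.List.pySetD ans i.2 (PySem.List.len prices - i.2 - 1)) st.1

-- ===== PORT B =====
-- the inner `for j in range(i + 1, n): count += 1; if prices[j] < prices[i]: break` loop
def pvScan (prices : List Int) (pi : Int) (js : List Int) (count : Int) : Int :=
  match js with
  | [] => count
  | j :: js' =>
      if PySem.List.pyGetD prices j 0 < pi then count + 1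
      else pvScan prices pi js' (count + 1)

-- the outer `for i in range(n)` loop appending one count per index
def solution_alt (prices : List Int) : List Int :=
  (PySem.List.pyRange 0 prices.length).foldl
    (fun answer i => answer ++
      [pvScan prices (PySem.List.pyGetD prices i 0) (PySem.List.pyRange (i + 1) prices.length) 0])
    []

-- ===== PRECONDITION & SPEC =====
-- Pre_ excludes only the empty list, on which A raises IndexError reading the first price.
def Pre_solution (prices : List Int) : Prop := prices ≠ []
instance (prices : List Int) : Decidable (Pre_solution prices) := by unfold Pre_solution; infer_instance
def pvWitness_solution : List Int := ([1, 2, 3, 6, 2, 3] : List Int)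

def Spec_solution (prices : List Int) (out : List Int) : Prop := out = solution_alt prices
instance (prices : List Int) (out : List Int) : Decidable (Spec_solution prices out) := by unfold Spec_solution; infer_instance

-- ===== CLAIM (what is proved, stated in full; the proofs are below) =====
def Claim_equal_solution : Prop := ∀ (prices : List Int), Dom_solution prices → Pre_solution prices → Spec_solution prices (solution prices)

-- ===== LEMMAS AND PROOFS =====

-- abbreviations used only by the proofs
-- pvCountDays p xs = what B's inner scan adds: elements of xs up to and including the first one below p
def pvCountDays (p : Int) (rest : List Int) : Int :=
  match rest with
  | [] => 0
  | q :: rest' => if q < p then 1 else 1 + pvCountDays p rest'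

def pvPd (prices : List Int) (j : Nat) : Int := prices.getD j 0
def pvCnt (prices : List Int) (j : Nat) : Int := pvCountDays (pvPd prices j) (prices.drop (j + 1))
def pvPair (prices : List Int) (j : Nat) : Int × Int := (pvPd prices j, (j : Int))

-- the indices (head = top) on A's stack after k iterations of the main loop
def pvSpecStack (prices : List Int) : Nat → List Nat
  | 0 => [0]
  | k + 1 => (k + 1) ::
      (pvSpecStack prices k).dropWhile (fun j => pvPd prices j > pvPd prices (k + 1))

-- A's loop state after k iterations
def pvLoopState (prices M : List Int) (k : Nat) : List Int × List (Int × Int) :=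
  (PySem.List.enumerate (M.take k) 0).foldl pvStep
    (List.replicate prices.length (0 : Int), [(prices.getD 0 0, (0 : Int))])

theorem pvStep_eq (st : List Int × List (Int × Int)) (ip : Int × Int) :
    pvStep st ip = ((pvPopLoop st.1 st.2 ip.1 ip.2).1,
      (ip.2, ip.1 + 1) :: (pvPopLoop st.1 st.2 ip.1 ip.2).2) := by
  rcases h : pvPopLoop st.1 st.2 ip.1 ip.2 with ⟨a, s⟩
  simp [pvStep, h]

-- B-side characterisation ----------------------------------------------------
theorem scan_eq_countDays (prices : List Int) (p : Int) (a : Nat) (c : Int)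
    (ha : a ≤ prices.length) :
    pvScan prices p (PySem.List.pyRange (a : Int) (prices.length : Int)) c =
      c + pvCountDays p (prices.drop a) := by
  induction hfuel : prices.length - a generalizing a c with
  | zero =>
    have haa : a = prices.length := by omega
    subst haa
    rw [PySem.List.pyRange_one_eq_nil (le_refl _), List.drop_length]
    simp [pvScan, pvCountDays]
  | succ m ih =>
    have hlt : a < prices.length := by omega
    rw [PySem.List.pyRange_one_cons (by exact_mod_cast hlt)]
    rw [List.drop_eq_getElem_cons hlt]
    have hget : PySem.List.pyGetD prices (a : Int) 0 = prices[a] := by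
      rw [PySem.List.pyGetD_natCast, List.getD_eq_getElem _ _ hlt]
    by_cases hb : prices[a] < p
    · simp [pvScan, pvCountDays, hget, hb]
    · rw [pvScan, hget, if_neg hb]
      rw [show ((a : Int) + 1) = ((a + 1 : Nat) : Int) from by push_cast; ring]
      rw [ih (a + 1) (c + 1) (by omega) (by omega)]
      rw [pvCountDays, if_neg hb]
      ring

theorem alt_eq_map (prices : List Int) :
    solution_alt prices =
      (List.range prices.length).map
        (fun k => pvCountDays (prices.getD k 0) (prices.drop (k + 1))) := by
  rw [solution_alt, PySem.List.foldl_append_singleton_eq_map, List.nil_append,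
    PySem.List.pyRange_zero_natCast, List.map_map]
  refine List.map_congr_left ?_
  intro k hk
  rw [List.mem_range] at hk
  simp only [Function.comp_apply]
  rw [PySem.List.pyGetD_natCast, show ((k : Int) + 1) = ((k + 1 : Nat) : Int) from by push_cast; ring,
    scan_eq_countDays prices _ (k + 1) 0 (by omega)]
  rw [zero_add]

theorem alt_length (l : List Int) : (solution_alt l).length = l.length := by
  rw [alt_eq_map]; simp

theorem alt_getD (l : List Int) (j : Nat) (hj : j < l.length) :
    (solution_alt l).getD j 0 = pvCountDays (l.getD j 0) (l.drop (j + 1)) := by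
  rw [alt_eq_map]
  rw [List.getD_eq_getElem _ _ (by simpa using hj)]
  simp

-- pvCountDays facts ----------------------------------------------------------
theorem countDays_all_ge (p : Int) (xs : List Int) (h : ∀ x ∈ xs, ¬ x < p) :
    pvCountDays p xs = (xs.length : Int) := by
  induction xs with
  | nil => rfl
  | cons q xs ih =>
    have hq : ¬ q < p := h q (by simp)
    simp [pvCountDays, hq, ih (fun x hx => h x (by simp [hx]))]
    ring

theorem countDays_append_lt (p : Int) (xs ys : List Int) (y : Int)
    (h : ∀ x ∈ xs, ¬ x < p) (hy : y < p) :
    pvCountDays p (xs ++ y :: ys) = (xs.length : Int) + 1 := by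
  induction xs with
  | nil => simp [pvCountDays, hy]
  | cons q xs ih =>
    have hq : ¬ q < p := h q (by simp)
    simp [pvCountDays, hq, ih (fun x hx => h x (by simp [hx]))]
    ring

theorem countDays_append_singleton (p : Int) (xs : List Int) (y : Int)
    (h : ∀ x ∈ xs, ¬ x < p) :
    pvCountDays p (xs ++ [y]) = (xs.length : Int) + 1 := by
  by_cases hy : y < p
  · exact countDays_append_lt p xs [] y h hy
  · have := countDays_all_ge p (xs ++ [y])
      (by intro x hx
          rcases List.mem_append.1 hx with hx | hx
          · exact h x hx
          · simp at hx; subst hx; exact hy)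
    simpa using this

-- elements of the still-rising middle segment are not below prices[j]
theorem mem_take_drop_ge (prices : List Int) (j m : Nat) (x : Int)
    (hx : x ∈ (prices.drop (j+1)).take m)
    (hchain : ∀ l, j < l → l ≤ j + m → pvPd prices j ≤ pvPd prices l) :
    ¬ x < pvPd prices j := by
  obtain ⟨i, hi, rfl⟩ := List.mem_iff_getElem.1 hx
  have hi' : i < m := by
    have := hi; simp [List.length_take] at this; omega
  have hlen : j + 1 + i < prices.length := by
    have := hi; simp [List.length_take, List.length_drop] at this; omega
  rw [List.getElem_take, List.getElem_drop]
  have h3 := hchain (j + 1 + i) (by omega) (by omega)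
  have h2 : pvPd prices (j + 1 + i) = prices[j + 1 + i]'hlen :=
    List.getD_eq_getElem _ _ hlen
  rw [h2] at h3
  omega

-- the value A writes when it pops (prices[j], j) while seeing prices[k+1]
theorem cnt_popped (prices : List Int) (j k : Nat)
    (hjk : j ≤ k) (hk : k + 1 < prices.length)
    (hchain : ∀ l, j < l → l ≤ k → pvPd prices j ≤ pvPd prices l)
    (hdrop : pvPd prices (k + 1) < pvPd prices j) :
    pvCnt prices j = ((k : Int) + 1) - (j : Int) := by
  have hsplit : prices.drop (j+1) =
      (prices.drop (j+1)).take (k - j) ++ prices[k+1] :: prices.drop (k+2) := by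
    conv_lhs => rw [← List.take_append_drop (k - j) (prices.drop (j+1))]
    congr 1
    rw [List.drop_drop]
    rw [show j + 1 + (k - j) = k + 1 from by omega]
    rw [List.drop_eq_getElem_cons hk]
  rw [pvCnt, hsplit, countDays_append_lt]
  · have hlt : (prices.drop (j+1)).length = prices.length - (j+1) := by simp
    rw [List.length_take, hlt]
    have : min (k - j) (prices.length - (j + 1)) = k - j := by omega
    rw [this]; omega
  · intro x hx
    exact mem_take_drop_ge prices j (k - j) x hx
      (fun l hl hl' => hchain l hl (by omega))
  · have h2 : pvPd prices (k + 1) = prices[k+1]'hk := List.getD_eq_getElem _ _ hk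
    rw [h2] at hdrop; exact hdrop

-- the value A writes in its final `for i in stack` pass
theorem cnt_final (prices : List Int) (j : Nat) (hj : j < prices.length)
    (hchain : ∀ l, j < l → l ≤ prices.length - 2 → pvPd prices j ≤ pvPd prices l) :
    pvCnt prices j = (prices.length : Int) - (j : Int) - 1 := by
  rcases Nat.lt_or_ge j (prices.length - 1) with hj2 | hj2
  · have hn1 : prices.length - 1 < prices.length := by omega
    have hsplit : prices.drop (j+1) =
        (prices.drop (j+1)).take (prices.length - 2 - j) ++
          prices[prices.length - 1] :: prices.drop (prices.length - 1 + 1) := by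
      conv_lhs => rw [← List.take_append_drop (prices.length - 2 - j) (prices.drop (j+1))]
      congr 1
      rw [List.drop_drop]
      rw [show j + 1 + (prices.length - 2 - j) = prices.length - 1 from by omega]
      rw [List.drop_eq_getElem_cons hn1]
    have hnil : prices.drop (prices.length - 1 + 1) = ([] : List Int) :=
      List.drop_eq_nil_of_le (by omega)
    rw [pvCnt, hsplit, hnil, countDays_append_singleton]
    · rw [List.length_take]
      have : min (prices.length - 2 - j) ((prices.drop (j+1)).length) =
          prices.length - 2 - j := by simp; omega
      rw [this]; omega
    · intro x hx
      exact mem_take_drop_ge prices j (prices.length - 2 - j) x hx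
        (fun l hl hl' => hchain l hl (by omega))
  · have hdrop : prices.drop (j+1) = [] := List.drop_eq_nil_of_le (by omega)
    rw [pvCnt, hdrop]
    have : j = prices.length - 1 := by omega
    subst this
    simp [pvCountDays]
    omega

-- generic: dropWhile = filter when the predicate is monotone along the list
theorem dropWhile_eq_filter_of_mono {α : Type} (g : α → Bool) (l : List α)
    (h : l.Pairwise (fun x y => g y = true → g x = true)) :
    l.dropWhile g = l.filter (fun x => !g x) := by
  induction l with
  | nil => simp
  | cons x l ih =>
    rcases List.pairwise_cons.1 h with ⟨hx, hl⟩
    by_cases hgx : g x = true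
    · simp [hgx, ih hl]
    · have hall : ∀ y ∈ l, g y = false := by
        intro y hy
        cases hgy : g y with
        | false => rfl
        | true => exact absurd (hx y hy hgy) (by simpa using hgx)
      have hfl : List.filter (fun x => !g x) l = l :=
        List.filter_eq_self.2 (fun a ha => by simp [hall a ha])
      simp [hgx, hfl]

-- pvSpecStack holds exactly the indices whose price has not yet dropped
theorem specStack_char (prices : List Int) (k : Nat) :
    (∀ j, j ∈ pvSpecStack prices k ↔
      (j ≤ k ∧ ∀ l, j < l → l ≤ k → pvPd prices j ≤ pvPd prices l)) ∧
    (pvSpecStack prices k).Pairwise (· > ·) := by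
  induction k with
  | zero =>
    constructor
    · intro j
      simp only [pvSpecStack, List.mem_singleton]
      constructor
      · rintro rfl; exact ⟨le_refl 0, fun l hl hl' => by omega⟩
      · rintro ⟨hj, -⟩; omega
    · simp [pvSpecStack]
  | succ k ih =>
    obtain ⟨hmem, hpw⟩ := ih
    have hmono : (pvSpecStack prices k).Pairwise
        (fun x y => (pvPd prices y > pvPd prices (k+1) : Bool) = true →
                    (pvPd prices x > pvPd prices (k+1) : Bool) = true) := by
      refine hpw.imp_of_mem ?_
      intro a b ha hb hab
      simp only [decide_eq_true_eq]
      intro hgb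
      have hbk := ((hmem b).mp hb)
      have hak := ((hmem a).mp ha)
      have : pvPd prices b ≤ pvPd prices a := hbk.2 a hab hak.1
      omega
    have hdf := dropWhile_eq_filter_of_mono _ _ hmono
    have hS1 : pvSpecStack prices (k+1) =
        (k + 1) :: (pvSpecStack prices k).filter
          (fun j => !(pvPd prices j > pvPd prices (k+1) : Bool)) := by
      rw [pvSpecStack, hdf]
    constructor
    · intro j
      rw [hS1]
      simp only [List.mem_cons, List.mem_filter, Bool.not_eq_eq_eq_not, Bool.not_true,
        decide_eq_false_iff_not, not_lt]
      constructor
      · rintro (rfl | ⟨hjS, hle⟩)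
        · exact ⟨le_refl _, fun l hl hl' => by omega⟩
        · obtain ⟨hjk, hchain⟩ := (hmem j).mp hjS
          refine ⟨by omega, fun l hl hl' => ?_⟩
          rcases Nat.lt_or_ge l (k+1) with h'|h'
          · exact hchain l hl (by omega)
          · have : l = k + 1 := by omega
            subst this; exact hle
      · rintro ⟨hjk1, hchain⟩
        rcases Nat.eq_or_lt_of_le hjk1 with rfl | hjk
        · exact Or.inl rfl
        · refine Or.inr ⟨(hmem j).mpr ⟨by omega, fun l hl hl' => hchain l hl (by omega)⟩, ?_⟩
          exact hchain (k+1) (by omega) (le_refl _)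
    · rw [hS1]
      refine List.pairwise_cons.2 ⟨?_, List.Pairwise.filter _ hpw⟩
      intro a ha
      have := (hmem a).mp (List.mem_of_mem_filter ha)
      omega

-- the while loop, on a stack of (price, index) pairs
theorem popLoop_spec (prices : List Int) (L : List Nat) (ans : List Int) (idx price : Int) :
    pvPopLoop ans (L.map (pvPair prices)) idx price =
      ((L.takeWhile (fun j => pvPd prices j > price)).foldl
          (fun (a : List Int) (j : Nat) => PySem.List.pySetD a (j : Int) ((idx + 1) - (j : Int))) ans,
       (L.dropWhile (fun j => pvPd prices j > price)).map (pvPair prices)) := by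
  induction L generalizing ans with
  | nil => simp [pvPopLoop]
  | cons j L ih =>
    by_cases h : pvPd prices j > price
    · simp [pvPopLoop, pvPair, h, ih]
    · simp [pvPopLoop, pvPair, h]

-- elementwise effect of a fold of in-range writes
theorem foldl_set_getD (L : List Nat) (v : Nat → Int) (ans : List Int)
    (hL : ∀ j ∈ L, j < ans.length) :
    (L.foldl (fun a j => a.set j (v j)) ans).length = ans.length ∧
    ∀ i, (L.foldl (fun a j => a.set j (v j)) ans).getD i 0 =
      if i ∈ L then v i else ans.getD i 0 := by
  induction L generalizing ans with
  | nil => simp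
  | cons j L ih =>
    have hj : j < ans.length := hL j (by simp)
    obtain ⟨hlen, hget⟩ := ih (ans.set j (v j))
      (by intro x hx; simpa using hL x (by simp [hx]))
    refine ⟨by simpa using hlen, ?_⟩
    intro i
    rw [List.foldl_cons, hget i]
    by_cases hij : i = j
    · subst hij
      by_cases hiL : i ∈ L <;> simp [hiL, List.getD, hj]
    · by_cases hiL : i ∈ L <;>
        simp [hiL, hij, List.getD, Ne.symm hij]

-- as above, for the pySetD form the ports use
theorem foldl_pySetD_getD (L : List Nat) (v : Nat → Int) (ans : List Int)
    (hL : ∀ j ∈ L, j < ans.length) :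
    (L.foldl (fun (a : List Int) (j : Nat) => PySem.List.pySetD a (j : Int) (v j)) ans).length = ans.length ∧
    ∀ i, (L.foldl (fun (a : List Int) (j : Nat) => PySem.List.pySetD a (j : Int) (v j)) ans).getD i 0 =
      if i ∈ L then v i else ans.getD i 0 := by
  have hfun : (fun (a : List Int) (j : Nat) => PySem.List.pySetD a (j : Int) (v j)) =
      (fun (a : List Int) (j : Nat) => a.set j (v j)) := by
    funext a j; rw [PySem.List.pySetD_natCast]
  rw [hfun]
  exact foldl_set_getD L v ans hL

-- the main loop invariant
theorem loop_inv (prices M : List Int)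
    (hM1 : M.length = prices.length - 2) (hM2 : M.length + 1 < prices.length + 1)
    (hMget : ∀ i, (h : i < M.length) → M[i] = pvPd prices (i + 1))
    (k : Nat) (hk : k ≤ M.length) :
    (pvLoopState prices M k).2 = (pvSpecStack prices k).map (pvPair prices) ∧
    (pvLoopState prices M k).1.length = prices.length ∧
    ∀ j, j < prices.length → (pvLoopState prices M k).1.getD j 0 =
      if j ≤ k ∧ j ∉ pvSpecStack prices k then pvCnt prices j else 0 := by
  induction k with
  | zero =>
    refine ⟨by simp [pvLoopState, pvSpecStack, pvPair, pvPd], by simp [pvLoopState], ?_⟩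
    intro j hj
    have hcond : ¬ (j ≤ 0 ∧ j ∉ pvSpecStack prices 0) := by
      simp [pvSpecStack]
    rw [if_neg hcond]
    simp [pvLoopState]
  | succ k ih =>
    obtain ⟨hstk, hlen, hans⟩ := ih (by omega)
    have hkM : k < M.length := by omega
    have hkP : k + 1 < prices.length := by omega
    -- one more iteration
    have hstep : pvLoopState prices M (k+1) =
        pvStep (pvLoopState prices M k) ((k : Int), M[k]) := by
      have h1 : M.take (k+1) = M.take k ++ [M[k]] := by
        rw [List.take_add_one, List.getElem?_eq_getElem hkM, Option.toList_some]
      have h2 : PySem.List.enumerate ([M[k]] : List Int) ((0:Int) + (M.take k).length) =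
          [((k : Int), M[k])] := by
        rw [PySem.List.enumerate_cons, PySem.List.enumerate_nil]
        simp [List.length_take, Nat.min_eq_left (le_of_lt hkM)]
      rw [pvLoopState, pvLoopState, h1, PySem.List.enumerate_append, List.foldl_append, h2,
        List.foldl_cons, List.foldl_nil]
    rw [hstep, pvStep_eq]
    simp only [hstk]
    rw [popLoop_spec prices (pvSpecStack prices k) _ (k : Int) (M[k])]
    rw [hMget k hkM]
    set g : Nat → Bool := fun j => pvPd prices j > pvPd prices (k + 1) with hg
    set T := (pvSpecStack prices k).takeWhile g with hT
    set D := (pvSpecStack prices k).dropWhile g with hD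
    obtain ⟨hchar, hpw⟩ := specStack_char prices k
    obtain ⟨hchar1, _⟩ := specStack_char prices (k+1)
    have hTD : T ++ D = pvSpecStack prices k := List.takeWhile_append_dropWhile
    have hmemT : ∀ j ∈ T, j ∈ pvSpecStack prices k := by
      intro j hj; rw [← hTD]; exact List.mem_append_left _ hj
    have hmemD : ∀ j ∈ D, j ∈ pvSpecStack prices k := by
      intro j hj; rw [← hTD]; exact List.mem_append_right _ hj
    have hSsucc : pvSpecStack prices (k+1) = (k+1) :: D := by rw [pvSpecStack]
    obtain ⟨hlen', hget'⟩ := foldl_pySetD_getD T (fun j => ((k:Int) + 1) - (j : Int))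
      (pvLoopState prices M k).1
      (by intro j hj
          have := (hchar j).mp (hmemT j hj)
          omega)
    constructor
    · -- stack component
      rw [hSsucc]
      simp [pvPair]
    refine ⟨by rw [hlen', hlen], ?_⟩
    intro j hj
    rw [hget' j, hans j hj]
    by_cases hjT : j ∈ T
    · rw [if_pos hjT]
      have hjS := hmemT j hjT
      obtain ⟨hjk, hchain⟩ := (hchar j).mp hjS
      have hgj : pvPd prices (k+1) < pvPd prices j := by
        have := List.mem_takeWhile_imp hjT
        simpa [hg] using this
      have hnotS1 : j ∉ pvSpecStack prices (k+1) := by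
        intro hmem1
        have := ((hchar1 j).mp hmem1).2 (k+1) (by omega) (le_refl _)
        omega
      rw [if_pos ⟨by omega, hnotS1⟩]
      exact (cnt_popped prices j k hjk hkP hchain hgj).symm
    · rw [if_neg hjT]
      by_cases hj1 : j = k + 1
      · subst hj1
        rw [if_neg (by omega), if_neg (by rw [hSsucc]; simp)]
      · by_cases hjk : j ≤ k
        · by_cases hjS : j ∈ pvSpecStack prices k
          · have hjD : j ∈ D := by
              rcases List.mem_append.1 (by rw [hTD]; exact hjS) with h | h
              · exact absurd h hjT
              · exact h
            rw [if_neg (by simp [hjS]), if_neg (by rw [hSsucc]; simp [hjD])]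
          · have hjS1 : j ∉ pvSpecStack prices (k+1) := by
              rw [hSsucc]
              intro hmem1
              rcases List.mem_cons.1 hmem1 with h | h
              · omega
              · exact hjS (hmemD j h)
            rw [if_pos ⟨hjk, hjS⟩, if_pos ⟨by omega, hjS1⟩]
        · rw [if_neg (by omega), if_neg (by omega)]

-- xs[1:-1] for a nonempty list
theorem slice_one_neg_one (p : Int) (t : List Int) :
    PySem.List.slice (p :: t) (some 1) (some (-1)) = t.dropLast := by
  simp [PySem.List.slice]
  rw [List.dropLast_eq_take]

-- ===== VERDICT (by name: the statement is the Claim_ definition above) =====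
theorem solution_spec : Claim_equal_solution := by
  intro prices _ hpre
  unfold Spec_solution
  obtain ⟨p, t, rfl⟩ := List.exists_cons_of_ne_nil hpre
  have hM1 : (t.dropLast).length = (p :: t).length - 2 := by simp
  have hM2 : (t.dropLast).length + 1 < (p :: t).length + 1 := by simp
  have hMget : ∀ i, (h : i < (t.dropLast).length) → (t.dropLast)[i] = pvPd (p :: t) (i + 1) := by
    intro i hi
    have hit : i < t.length := by simp at hi; omega
    rw [List.getElem_dropLast]
    rw [pvPd, List.getD_eq_getElem _ _ (by simpa using Nat.succ_lt_succ hit)]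
    simp
  set K := (t.dropLast).length with hK
  obtain ⟨hstk, hlen, hans⟩ := loop_inv (p :: t) t.dropLast hM1 hM2 hMget K (le_refl _)
  obtain ⟨hcharK, _⟩ := specStack_char (p :: t) K
  have hsol : solution (p :: t) =
      ((pvSpecStack (p :: t) K).map (pvPair (p :: t))).foldr
        (fun i ans => PySem.List.pySetD ans i.2 (PySem.List.len (p :: t) - i.2 - 1))
        (pvLoopState (p :: t) t.dropLast K).1 := by
    rw [solution]
    simp only [PySem.List.pyGet?_zero_cons]
    rw [slice_one_neg_one]
    rw [← hstk]
    rw [pvLoopState, List.take_length]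
    rfl
  rw [hsol, List.foldr_map]
  have hfr : ∀ (L : List Nat) (b : List Int),
      L.foldr (fun j ans => PySem.List.pySetD ans (pvPair (p :: t) j).2
        (PySem.List.len (p :: t) - (pvPair (p :: t) j).2 - 1)) b =
      L.reverse.foldl (fun a j => a.set j (((p :: t).length : Int) - (j : Int) - 1)) b := by
    intro L b
    rw [← List.foldl_reverse]
    simp [pvPair, PySem.List.pySetD_natCast, PySem.List.len_eq]
  rw [hfr]
  obtain ⟨hlenF, hgetF⟩ := foldl_set_getD ((pvSpecStack (p :: t) K).reverse)
    (fun j => (((p :: t).length : Int) - (j : Int) - 1))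
    (pvLoopState (p :: t) t.dropLast K).1
    (by intro j hj
        rw [List.mem_reverse] at hj
        have := (hcharK j).mp hj
        rw [hlen]
        simp at hM2 ⊢
        omega)
  apply List.ext_getElem
  · rw [hlenF, hlen, alt_length]
  · intro j hj1 hj2
    have hjP : j < (p :: t).length := by rw [hlenF, hlen] at hj1; exact hj1
    rw [← List.getD_eq_getElem _ 0 hj1, ← List.getD_eq_getElem _ 0 hj2]
    rw [hgetF j]
    simp only [List.mem_reverse]
    rw [hans j hjP]
    have halt : (solution_alt (p :: t)).getD j 0 = pvCnt (p :: t) j :=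
      alt_getD (p :: t) j hjP
    rw [halt]
    by_cases hjS : j ∈ pvSpecStack (p :: t) K
    · rw [if_pos hjS]
      obtain ⟨hjK, hchain⟩ := (hcharK j).mp hjS
      rw [cnt_final (p :: t) j hjP (by rw [← hM1]; exact fun l hl hl' => hchain l hl hl')]
    · rw [if_neg hjS]
      by_cases hjK : j ≤ K
      · rw [if_pos ⟨hjK, hjS⟩]
      · rw [if_neg (by omega)]
        have hjeq : j + 1 = (p :: t).length := by
          simp at hM1
          simp at hjP ⊢
          omega
        rw [pvCnt, List.drop_eq_nil_of_le (by omega)]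
        rfl
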